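-- pv_equiv track=rewrite | github.com/HenriWahl/dhcpy6d | server/helpers.py | decompress_ip6
-- ===== SOURCE A (Python) =====
-- ADDRESS_CHARS_STRICT = ':0123456789abcdef'
--
-- ADDRESS_CHARS_NON_STRICT = ':0123456789abcdefx'
--
-- def decompress_ip6(ip6, strict=True):
--     """
--     decompresses shortened IPv6 address and returns it as ':'-less 32 character string
--     additionally allows testing for prototype address with less strict set of allowed characters
--     """
--
--     ip6 = ip6.lower()
--     # cache some repeated calls
--     colon_count1 = ip6.count(':')
--     colon_count2 = ip6.count('::')
--     colon_count3 = ip6.count(':::')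
--
--     # if in strict mode there are no hex numbers and ':' something is wrong
--     if strict:
--         for c in ip6:
--             if c not in ADDRESS_CHARS_STRICT:
--                 raise Exception('{} should consist only of : 0 1 2 3 4 5 6 7 8 9 a b c d e f'.format(ip6))
--     else:
--         # used for comparison of leases with address pattern - X replace the dynamic part of the address
--         for c in ip6:
--             if c not in ADDRESS_CHARS_NON_STRICT:
--                 raise Exception('{} should consist only of : 0 1 2 3 4 5 6 7 8 9 a b c d e f x'.format(ip6))
--     # nothing to do
--     if len(ip6) == 32 and colon_count1 == 0:
--         return ip6
--
--     # larger heaps of :: smell like something wrong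
--     if colon_count2 > 1 or colon_count3 >= 1:
--         raise Exception("{} has too many accumulated ':'".format(ip6))
--
--     # less than 7 ':' but no '::' also make a bad impression
--     if colon_count1 < 7 and colon_count2 != 1:
--         raise Exception("{} is missing some ':'".format(ip6))
--
--     # replace :: with :0000:: - the last ':' will be cut of finally
--     while ip6.count(':') < 8 and ip6.count('::') == 1:
--         ip6 = ip6.replace('::', ':0000::')
--
--     # remaining ':' will be cut off
--     ip6 = ip6.replace('::', ':')
--
--     # ':' at the beginning have to be filled up with 0000 too
--     if ip6.startswith(':'):
--         ip6 = '0000' + ip6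
--
--     # if a segment is shorter than 4 chars the gaps get filled with zeros
--     ip6_segments_source = ip6.split(':')
--     ip6_segments_target = list()
--     for s in ip6_segments_source:
--         if len(s) > 4:
--             raise Exception("{} has segment with more than 4 digits".format(ip6))
--         else:
--             ip6_segments_target.append(s.zfill(4))
--
--     # return with separator (mostly '')
--     return ''.join(ip6_segments_target)
-- ===== SOURCE B (Python) =====
-- ADDRESS_CHARS_STRICT = ':0123456789abcdef'
--
-- ADDRESS_CHARS_NON_STRICT = ':0123456789abcdefx'
--
-- def decompress_ip6(ip6, strict=True):
--     """
--     decompresses shortened IPv6 address and returns it as ':'-less 32 character string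
--     additionally allows testing for prototype address with less strict set of allowed characters
--     """
--
--     ip6 = ip6.lower()
--     colon_count1 = ip6.count(':')
--     colon_count2 = ip6.count('::')
--     colon_count3 = ip6.count(':::')
--
--     if strict:
--         for c in ip6:
--             if c not in ADDRESS_CHARS_STRICT:
--                 raise Exception('{} should consist only of : 0 1 2 3 4 5 6 7 8 9 a b c d e f'.format(ip6))
--     else:
--         for c in ip6:
--             if c not in ADDRESS_CHARS_NON_STRICT:
--                 raise Exception('{} should consist only of : 0 1 2 3 4 5 6 7 8 9 a b c d e f x'.format(ip6))
--
--     if len(ip6) == 32 and colon_count1 == 0: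
--         return ip6
--
--     if colon_count2 > 1 or colon_count3 >= 1:
--         raise Exception("{} has too many accumulated ':'".format(ip6))
--
--     if colon_count1 < 7 and colon_count2 != 1:
--         raise Exception("{} is missing some ':'".format(ip6))
--
--     # instead of repeatedly expanding '::' in a while loop, build the segment
--     # list directly: the groups left and right of '::' plus the missing zero groups
--     if colon_count2 == 1:
--         left, right = ip6.split('::')
--         segments = left.split(':') + ['0000'] * max(8 - colon_count1, 0) + right.split(':')
--     else:
--         segments = ip6.split(':')
--
--     for segment in segments:
--         if len(segment) > 4:
--             raise Exception("{} has segment with more than 4 digits".format(ip6))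
--
--     return ''.join(segment.zfill(4) for segment in segments)
-- ===== Notes on version B (the rewrite author's own statement) =====
-- stated objective: simpler
-- what changed: A expands the shortened address by repeatedly substituting a zero group at the double-colon inside a while loop and then patching up a leading separator; B instead splits the address once at the double colon and builds the segment list directly from the left groups, the computed number of missing zero groups, and the right groups.
import Mathlib
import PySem

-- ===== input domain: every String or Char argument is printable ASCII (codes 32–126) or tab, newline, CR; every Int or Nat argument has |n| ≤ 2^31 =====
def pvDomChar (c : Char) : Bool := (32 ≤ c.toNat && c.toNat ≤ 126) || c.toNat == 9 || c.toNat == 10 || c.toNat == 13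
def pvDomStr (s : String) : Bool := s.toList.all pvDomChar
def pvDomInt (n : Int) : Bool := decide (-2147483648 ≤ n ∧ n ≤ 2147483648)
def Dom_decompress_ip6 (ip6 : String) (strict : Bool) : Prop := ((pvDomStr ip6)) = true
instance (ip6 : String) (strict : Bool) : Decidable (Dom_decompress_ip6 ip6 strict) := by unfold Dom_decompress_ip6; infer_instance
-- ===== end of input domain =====

-- B replaces the while-loop double-colon expansion by a single split there plus a computed zero-group fill
-- (return-value equivalence; A raises on malformed input — those inputs are outside Pre_).

-- ===== PORT A =====
def ADDRESS_CHARS_STRICT : String := ":0123456789abcdef"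

def ADDRESS_CHARS_NON_STRICT : String := ":0123456789abcdefx"

-- structural counterparts of PySem.Chars.count/replace (needed to prove the while loop of A terminates)
def cntF (sub : List Char) : List Char → Nat
  | [] => 0
  | c :: t => if sub.isPrefixOf (c :: t) then cntF sub (t.drop (sub.length - 1)) + 1 else cntF sub t
  termination_by l => l.length
  decreasing_by
  · simp only [List.length_drop, List.length_cons]; omega
  · simp only [List.length_cons]; omega

theorem cntF_nil (sub : List Char) : cntF sub [] = 0 := by rw [cntF]

theorem cntF_cons (sub : List Char) (c : Char) (t : List Char) :
    cntF sub (c :: t) = if sub.isPrefixOf (c :: t) then cntF sub (t.drop (sub.length - 1)) + 1 else cntF sub t := by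
  rw [cntF]

theorem count_go_eq (sub : List Char) (hs : sub ≠ []) :
    ∀ (fuel : Nat) (l : List Char) (acc : Nat), l.length ≤ fuel →
      PySem.Chars.count.go sub fuel l acc = acc + cntF sub l := by
  intro fuel
  induction fuel using Nat.strong_induction_on with
  | _ n ih =>
    intro l acc h
    match n, l with
    | 0, [] => simp [PySem.Chars.count.go, cntF_nil]
    | 0, c :: t => simp at h
    | Nat.succ m, [] => simp [PySem.Chars.count.go, cntF_nil]
    | Nat.succ m, c :: t =>
      rw [PySem.Chars.count.go, cntF_cons]
      have hd : List.drop sub.length (c :: t) = t.drop (sub.length - 1) := by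
        cases sub with
        | nil => exact absurd rfl hs
        | cons a s => simp
      have hlt : t.length ≤ m := by simp at h; omega
      have hld : (t.drop (sub.length - 1)).length ≤ m := by
        have := List.length_drop (i := sub.length - 1) (l := t); omega
      by_cases hp : sub.isPrefixOf (c :: t)
      · rw [if_pos hp, if_pos hp, hd, ih m (by omega) _ _ hld]
        omega
      · rw [if_neg hp, if_neg hp, ih m (by omega) _ _ hlt]

theorem chars_count_eq (l sub : List Char) (hs : sub ≠ []) :
    PySem.Chars.count l sub = cntF sub l := by
  rw [PySem.Chars.count, if_neg (fun hh => hs (List.isEmpty_iff.mp hh)),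
      count_go_eq sub hs _ _ _ le_rfl]
  omega

def repF (old new : List Char) : List Char → List Char
  | [] => []
  | c :: t => if old.isPrefixOf (c :: t) then new ++ repF old new (t.drop (old.length - 1)) else c :: repF old new t
  termination_by l => l.length
  decreasing_by
  · simp only [List.length_drop, List.length_cons]; omega
  · simp only [List.length_cons]; omega

theorem repF_nil (old new : List Char) : repF old new [] = [] := by rw [repF]

theorem repF_cons (old new : List Char) (c : Char) (t : List Char) :
    repF old new (c :: t) = if old.isPrefixOf (c :: t) then new ++ repF old new (t.drop (old.length - 1)) else c :: repF old new t := by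
  rw [repF]

theorem replace_go_eq (old new : List Char) (hs : old ≠ []) :
    ∀ (fuel : Nat) (l : List Char) (acc : List Char), l.length ≤ fuel →
      PySem.Chars.replace.go old new fuel l acc = acc.reverse ++ repF old new l := by
  intro fuel
  induction fuel using Nat.strong_induction_on with
  | _ n ih =>
    intro l acc h
    match n, l with
    | 0, [] => simp [PySem.Chars.replace.go, repF_nil]
    | 0, c :: t => simp at h
    | Nat.succ m, [] => simp [PySem.Chars.replace.go, repF_nil]
    | Nat.succ m, c :: t =>
      rw [PySem.Chars.replace.go, repF_cons]
      have hd : List.drop old.length (c :: t) = t.drop (old.length - 1) := by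
        cases old with
        | nil => exact absurd rfl hs
        | cons a s => simp
      have hlt : t.length ≤ m := by simp at h; omega
      have hld : (t.drop (old.length - 1)).length ≤ m := by
        have := List.length_drop (i := old.length - 1) (l := t); omega
      by_cases hp : old.isPrefixOf (c :: t)
      · rw [if_pos hp, if_pos hp, hd, ih m (by omega) _ _ hld]
        simp
      · rw [if_neg hp, if_neg hp, ih m (by omega) _ _ hlt]
        simp

theorem chars_replace_eq (l old new : List Char) (hs : old ≠ []) :
    PySem.Chars.replace l old new = repF old new l := by
  rw [PySem.Chars.replace, if_neg (fun hh => hs (List.isEmpty_iff.mp hh)),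
      replace_go_eq old new hs _ _ _ le_rfl]
  simp

theorem cntF_colon_eq_count (l : List Char) : cntF [':'] l = l.count ':' := by
  induction l with
  | nil => simp [cntF_nil]
  | cons c t ih =>
    rw [cntF_cons]
    by_cases hc : c = ':'
    · subst hc
      rw [if_pos (by simp [List.isPrefixOf])]
      simp [ih, List.count_cons]
    · rw [if_neg (by simp [List.isPrefixOf, hc]; intro hh; exact hc hh.symm)]
      simp [ih, List.count_cons, hc]

theorem prefix2_iff (c : Char) (t : List Char) :
    [':', ':'].isPrefixOf (c :: t) = true ↔ c = ':' ∧ ∃ u, t = ':' :: u := by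
  cases t with
  | nil => simp only [List.isPrefixOf, Bool.and_eq_true, beq_iff_eq]; simp
  | cons b u =>
    simp only [List.isPrefixOf, Bool.and_eq_true, beq_iff_eq, List.isPrefixOf_nil_left, and_true]
    constructor
    · rintro ⟨h1, h2⟩; exact ⟨h1.symm, u, by rw [h2]⟩
    · rintro ⟨h1, u', hu⟩; cases hu; exact ⟨h1.symm, rfl⟩
theorem count_colon_repF (l : List Char) :
    (repF [':', ':'] [':', '0', '0', '0', '0', ':', ':'] l).count ':' = l.count ':' + cntF [':', ':'] l := by
  induction l using cntF.induct (sub := [':', ':']) with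
  | case1 => simp [repF_nil, cntF_nil]
  | case2 c t hp ih =>
    obtain ⟨hc, u, rfl⟩ := (prefix2_iff c t).mp hp
    subst hc
    rw [repF_cons, if_pos hp, cntF_cons, if_pos hp]
    simp only [List.length_cons, List.length_nil, List.drop_succ_cons, List.drop_zero] at *
    simp [List.count_append, List.count_cons, ih]
    omega
  | case3 c t hp ih =>
    rw [repF_cons, if_neg hp, cntF_cons, if_neg hp]
    simp [List.count_cons, ih]
    omega

theorem count_replace_succ (s : List Char) (h : PySem.Chars.count s [':', ':'] = 1) :
    PySem.Chars.count (PySem.Chars.replace s [':', ':'] [':', '0', '0', '0', '0', ':', ':']) [':'] =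
      PySem.Chars.count s [':'] + 1 := by
  rw [chars_replace_eq _ _ _ (by simp), chars_count_eq _ _ (by simp), chars_count_eq _ _ (by simp),
      cntF_colon_eq_count, cntF_colon_eq_count, count_colon_repF]
  rw [chars_count_eq _ _ (by simp)] at h
  omega

-- the 'while ip6.count(':') < 8 and ip6.count('::') == 1: ip6 = ip6.replace('::', ':0000::')' loop of A
def loopA (s : List Char) : List Char :=
  if h : PySem.Chars.count s [':'] < 8 ∧ PySem.Chars.count s [':', ':'] = 1 then
    loopA (PySem.Chars.replace s [':', ':'] [':', '0', '0', '0', '0', ':', ':'])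
  else s
  termination_by 8 - PySem.Chars.count s [':']
  decreasing_by
    have := count_replace_succ s h.2
    omega

def decompress_ip6 (ip6 : String) (strict : Bool) : String :=
  let low := PySem.Chars.lower ip6.toList
  let colon_count1 := PySem.Chars.count low [':']
  let colon_count2 := PySem.Chars.count low [':', ':']
  let colon_count3 := PySem.Chars.count low [':', ':', ':']
  -- 'for c in ip6: if c not in …: raise' — ok = the loop finds no bad character
  let ok := if strict then low.all (fun c => PySem.Chars.isIn [c] ADDRESS_CHARS_STRICT.toList)
            else low.all (fun c => PySem.Chars.isIn [c] ADDRESS_CHARS_NON_STRICT.toList)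
  if ok = false then "" else  -- raise Exception('… should consist only of …')
  if low.length = 32 ∧ colon_count1 = 0 then String.ofList low else
  if 1 < colon_count2 ∨ 1 ≤ colon_count3 then "" else  -- raise "has too many accumulated ':'"
  if colon_count1 < 7 ∧ colon_count2 ≠ 1 then "" else  -- raise "is missing some ':'"
  let expanded := loopA low
  let replaced := PySem.Chars.replace expanded [':', ':'] [':']
  let filled := if PySem.Chars.startswith replaced [':'] then '0' :: '0' :: '0' :: '0' :: replaced else replaced
  let segs := PySem.Chars.splitOn filled [':']
  if segs.any (fun s => 4 < s.length) then "" else  -- raise "has segment with more than 4 digits"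
  String.ofList (PySem.Chars.join [] (segs.map (fun s => PySem.Chars.zfill s 4)))

-- ===== PORT B =====
def decompress_ip6_alt (ip6 : String) (strict : Bool) : String :=
  let low := PySem.Chars.lower ip6.toList
  let colon_count1 := PySem.Chars.count low [':']
  let colon_count2 := PySem.Chars.count low [':', ':']
  let colon_count3 := PySem.Chars.count low [':', ':', ':']
  let ok := if strict then low.all (fun c => PySem.Chars.isIn [c] ADDRESS_CHARS_STRICT.toList)
            else low.all (fun c => PySem.Chars.isIn [c] ADDRESS_CHARS_NON_STRICT.toList)
  if ok = false then "" else
  if low.length = 32 ∧ colon_count1 = 0 then String.ofList low else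
  if 1 < colon_count2 ∨ 1 ≤ colon_count3 then "" else
  if colon_count1 < 7 ∧ colon_count2 ≠ 1 then "" else
  let segments :=
    if colon_count2 = 1 then
      match PySem.Chars.splitOn low [':', ':'] with
      | [left, right] =>
          PySem.Chars.splitOn left [':']
            ++ List.replicate (max (8 - (colon_count1 : Int)) 0).toNat ['0', '0', '0', '0']
            ++ PySem.Chars.splitOn right [':']
      | _ => []  -- unreachable: count('::') == 1 means split('::') has exactly two parts
    else PySem.Chars.splitOn low [':']
  if segments.any (fun s => 4 < s.length) then "" else
  String.ofList (PySem.Chars.join [] (segments.map (fun s => PySem.Chars.zfill s 4)))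

-- ===== PRECONDITION & SPEC =====
-- Pre_ = exactly the inputs on which Python A returns normally: only allowed characters, and
-- either a 32-char ':'-less string, or a well-formed address (no '::'-pileup, enough ':',
-- every ':'-separated group at most 4 characters).
def Pre_decompress_ip6 (ip6 : String) (strict : Bool) : Prop :=
  ((PySem.Chars.lower ip6.toList).all
      (fun c => (if strict then ADDRESS_CHARS_STRICT else ADDRESS_CHARS_NON_STRICT).toList.contains c)) = true
  ∧ (((PySem.Chars.lower ip6.toList).length = 32 ∧ PySem.Chars.count (PySem.Chars.lower ip6.toList) [':'] = 0)
     ∨ (PySem.Chars.count (PySem.Chars.lower ip6.toList) [':', ':'] ≤ 1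
        ∧ PySem.Chars.count (PySem.Chars.lower ip6.toList) [':', ':', ':'] = 0
        ∧ (7 ≤ PySem.Chars.count (PySem.Chars.lower ip6.toList) [':']
           ∨ PySem.Chars.count (PySem.Chars.lower ip6.toList) [':', ':'] = 1)
        ∧ ∀ seg ∈ PySem.Chars.splitOn (PySem.Chars.lower ip6.toList) [':'], seg.length ≤ 4))

instance (ip6 : String) (strict : Bool) : Decidable (Pre_decompress_ip6 ip6 strict) := by
  unfold Pre_decompress_ip6; infer_instance

def pvWitness_decompress_ip6 : String × Bool := ("2001:db8::1", true)

def Spec_decompress_ip6 (ip6 : String) (strict : Bool) (out : String) : Prop :=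
  out = decompress_ip6_alt ip6 strict

instance (ip6 : String) (strict : Bool) (out : String) : Decidable (Spec_decompress_ip6 ip6 strict out) := by
  unfold Spec_decompress_ip6; infer_instance

-- ===== CLAIM (what is proved, stated in full; the proofs are below) =====
def Claim_equal_decompress_ip6 : Prop :=
  ∀ (ip6 : String) (strict : Bool), Dom_decompress_ip6 ip6 strict → Pre_decompress_ip6 ip6 strict →
    Spec_decompress_ip6 ip6 strict (decompress_ip6 ip6 strict)

-- ===== LEMMAS AND PROOFS =====


theorem prefix1_iff (c : Char) (t : List Char) :
    [':'].isPrefixOf (c :: t) = true ↔ c = ':' := by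
  simp only [List.isPrefixOf, Bool.and_eq_true, beq_iff_eq, List.isPrefixOf_nil_left, and_true]
  exact eq_comm

theorem prefix3_iff (c : Char) (t : List Char) :
    [':', ':', ':'].isPrefixOf (c :: t) = true ↔ c = ':' ∧ ∃ u, t = ':' :: ':' :: u := by
  cases t with
  | nil => simp only [List.isPrefixOf, Bool.and_eq_true, beq_iff_eq]; simp
  | cons b u =>
    cases u with
    | nil => simp only [List.isPrefixOf, Bool.and_eq_true, beq_iff_eq]; simp
    | cons d v =>
      simp only [List.isPrefixOf, Bool.and_eq_true, beq_iff_eq, List.isPrefixOf_nil_left, and_true]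
      constructor
      · rintro ⟨h1, h2, h3⟩; exact ⟨h1.symm, v, by rw [← h2, ← h3]⟩
      · rintro ⟨h1, u', hu⟩; cases hu; exact ⟨h1.symm, rfl, rfl⟩


-- structural counterpart of PySem.Chars.splitOn (used by the proofs below)
def splF (sep : List Char) : List Char → List (List Char)
  | [] => [[]]
  | c :: t =>
      if sep.isPrefixOf (c :: t) then [] :: splF sep (t.drop (sep.length - 1))
      else
        match splF sep t with
        | [] => [[c]]
        | h :: r => (c :: h) :: r
  termination_by l => l.length
  decreasing_by
  · simp only [List.length_drop, List.length_cons]; omega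
  · simp only [List.length_cons]; omega

theorem splF_nil (sep : List Char) : splF sep [] = [[]] := by rw [splF]

theorem splF_cons (sep : List Char) (c : Char) (t : List Char) :
    splF sep (c :: t) = if sep.isPrefixOf (c :: t) then [] :: splF sep (t.drop (sep.length - 1))
      else match splF sep t with
        | [] => [[c]]
        | h :: r => (c :: h) :: r := by
  rw [splF]

theorem splF_ne_nil (sep l : List Char) : splF sep l ≠ [] := by
  match l with
  | [] => simp [splF_nil]
  | c :: t =>
    rw [splF_cons]
    by_cases hp : sep.isPrefixOf (c :: t)
    · simp [hp]
    · simp only [hp, if_false]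
      cases splF sep t <;> simp

theorem splitOn_go_eq (sep : List Char) (hs : sep ≠ []) :
    ∀ (fuel : Nat) (l : List Char) (cur : List Char) (acc : List (List Char)), l.length ≤ fuel →
      PySem.Chars.splitOn.go sep fuel l cur acc =
        acc.reverse ++ (match splF sep l with
          | [] => [cur.reverse]
          | h :: r => (cur.reverse ++ h) :: r) := by
  intro fuel
  induction fuel using Nat.strong_induction_on with
  | _ n ih =>
    intro l cur acc h
    match n, l with
    | 0, [] => simp [PySem.Chars.splitOn.go, splF_nil]
    | 0, c :: t => simp at h
    | Nat.succ m, [] => simp [PySem.Chars.splitOn.go, splF_nil]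
    | Nat.succ m, c :: t =>
      rw [PySem.Chars.splitOn.go, splF_cons]
      have hd : List.drop sep.length (c :: t) = t.drop (sep.length - 1) := by
        cases sep with
        | nil => exact absurd rfl hs
        | cons a s => simp
      have hlt : t.length ≤ m := by simp at h; omega
      have hld : (t.drop (sep.length - 1)).length ≤ m := by
        have := List.length_drop (i := sep.length - 1) (l := t); omega
      by_cases hp : sep.isPrefixOf (c :: t)
      · rw [if_pos hp, if_pos hp, hd, ih m (by omega) _ _ _ hld]
        have := splF_ne_nil sep (t.drop (sep.length - 1))
        cases hsp : splF sep (t.drop (sep.length - 1)) with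
        | nil => exact absurd hsp this
        | cons h' r => simp
      · rw [if_neg hp, if_neg hp, ih m (by omega) _ _ _ hlt]
        have := splF_ne_nil sep t
        cases hsp : splF sep t with
        | nil => exact absurd hsp this
        | cons h' r => simp

theorem chars_splitOn_eq (l sep : List Char) (hs : sep ≠ []) :
    PySem.Chars.splitOn l sep = splF sep l := by
  rw [PySem.Chars.splitOn]
  rw [splitOn_go_eq sep hs (l.length + 1) l [] [] (by omega)]
  have := splF_ne_nil sep l
  cases hsp : splF sep l with
  | nil => exact absurd hsp this
  | cons h r => simp

-- proof-side helpers: the structural shape of an address with exactly one '::'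
def zeros4 : List Char := ['0', '0', '0', '0']

def chunk : List Char := ':' :: zeros4

def rep0 (i : Nat) : List Char := (List.replicate i chunk).flatten

def noCC (l : List Char) : Prop := List.IsChain (fun a b => ¬(a = ':' ∧ b = ':')) l

theorem noCC_nil : noCC [] := List.IsChain.nil

theorem noCC_cons_iff (c : Char) (l : List Char) :
    noCC (c :: l) ↔ (∀ b ∈ l.head?, ¬(c = ':' ∧ b = ':')) ∧ noCC l := by
  unfold noCC
  exact List.isChain_cons

theorem cnt2_zero_iff (l : List Char) : cntF [':', ':'] l = 0 ↔ noCC l := by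
  induction l with
  | nil => simp [cntF_nil, noCC_nil]
  | cons c t ih =>
    rw [cntF_cons, noCC_cons_iff]
    by_cases hp : [':', ':'].isPrefixOf (c :: t)
    · rw [if_pos hp]
      obtain ⟨hc, u, rfl⟩ := (prefix2_iff c t).mp hp
      simp [hc]
    · rw [if_neg hp, ih]
      have hns : ∀ b ∈ t.head?, ¬(c = ':' ∧ b = ':') := by
        intro b hb hcb
        cases t with
        | nil => simp at hb
        | cons b' u =>
          simp at hb
          exact hp ((prefix2_iff c (b' :: u)).mpr ⟨hcb.1, u, by rw [hb, hcb.2]⟩)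
      exact ⟨fun h => ⟨hns, h⟩, fun h => h.2⟩

theorem repF2_of_noCC (new l : List Char) (h : noCC l) : repF [':', ':'] new l = l := by
  induction l with
  | nil => simp [repF_nil]
  | cons c t ih =>
    rw [noCC_cons_iff] at h
    rw [repF_cons, if_neg, ih h.2]
    intro hp
    obtain ⟨hc, u, rfl⟩ := (prefix2_iff c t).mp hp
    exact h.1 ':' (by simp) ⟨hc, rfl⟩

theorem spl2_of_noCC (l : List Char) (h : noCC l) : splF [':', ':'] l = [l] := by
  induction l with
  | nil => simp [splF_nil]
  | cons c t ih =>
    rw [noCC_cons_iff] at h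
    rw [splF_cons, if_neg, ih h.2]
    intro hp
    obtain ⟨hc, u, rfl⟩ := (prefix2_iff c t).mp hp
    exact h.1 ':' (by simp) ⟨hc, rfl⟩

-- one step of each decomposition induction: the '::' is not found inside c :: L
theorem step_not_prefix (c : Char) (L R : List Char) (h : noCC (c :: L))
    (hlast : (c :: L).getLast? ≠ some ':') :
    ¬ [':', ':'].isPrefixOf (c :: (L ++ ':' :: ':' :: R)) = true := by
  intro hp
  obtain ⟨hc, u, hu⟩ := (prefix2_iff c _).mp hp
  cases L with
  | nil => simp at hu hlast; exact hlast (by rw [hc])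
  | cons b L' =>
    simp at hu
    rw [noCC_cons_iff] at h
    exact h.1 b (by simp) ⟨hc, hu.1⟩

theorem noCC_tail (c : Char) (l : List Char) (h : noCC (c :: l)) : noCC l :=
  ((noCC_cons_iff c l).mp h).2

theorem getLast?_tail (c : Char) (l : List Char) (hl : l ≠ [])
    (h : (c :: l).getLast? ≠ some ':') : l.getLast? ≠ some ':' := by
  cases l with
  | nil => exact absurd rfl hl
  | cons b u => simpa using h

theorem cnt2_decomp (L R : List Char) (hL : noCC L) (hlast : L.getLast? ≠ some ':')
    (hR : noCC R) (hhead : R.head? ≠ some ':') :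
    cntF [':', ':'] (L ++ ':' :: ':' :: R) = 1 := by
  induction L with
  | nil =>
    rw [List.nil_append, cntF_cons, if_pos ((prefix2_iff _ _).mpr ⟨rfl, R, rfl⟩)]
    simp only [List.length_cons, List.length_nil, List.drop_succ_cons, List.drop_zero]
    rw [(cnt2_zero_iff R).mpr hR]
  | cons c L' ih =>
    rw [List.cons_append, cntF_cons, if_neg (step_not_prefix c L' R hL hlast)]
    by_cases hnil : L' = []
    · subst hnil
      simp at hlast
      rw [List.nil_append, cntF_cons,
          if_pos ((prefix2_iff _ _).mpr ⟨rfl, R, rfl⟩)]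
      simp only [List.length_cons, List.length_nil, List.drop_succ_cons, List.drop_zero]
      rw [(cnt2_zero_iff R).mpr hR]
    · exact ih (noCC_tail c L' hL) (getLast?_tail c L' hnil hlast)

theorem repF2_decomp (new L R : List Char) (hL : noCC L) (hlast : L.getLast? ≠ some ':')
    (hR : noCC R) (hhead : R.head? ≠ some ':') :
    repF [':', ':'] new (L ++ ':' :: ':' :: R) = L ++ new ++ R := by
  induction L with
  | nil =>
    rw [List.nil_append, repF_cons, if_pos ((prefix2_iff _ _).mpr ⟨rfl, R, rfl⟩)]
    simp only [List.length_cons, List.length_nil, List.drop_succ_cons, List.drop_zero]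
    rw [repF2_of_noCC new R hR, List.nil_append]
  | cons c L' ih =>
    rw [List.cons_append, repF_cons, if_neg (step_not_prefix c L' R hL hlast)]
    by_cases hnil : L' = []
    · subst hnil
      simp at hlast
      rw [List.nil_append, repF_cons, if_pos ((prefix2_iff _ _).mpr ⟨rfl, R, rfl⟩)]
      simp only [List.length_cons, List.length_nil, List.drop_succ_cons, List.drop_zero]
      rw [repF2_of_noCC new R hR]
      simp
    · rw [ih (noCC_tail c L' hL) (getLast?_tail c L' hnil hlast)]
      simp

theorem spl2_decomp (L R : List Char) (hL : noCC L) (hlast : L.getLast? ≠ some ':')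
    (hR : noCC R) (hhead : R.head? ≠ some ':') :
    splF [':', ':'] (L ++ ':' :: ':' :: R) = [L, R] := by
  induction L with
  | nil =>
    rw [List.nil_append, splF_cons, if_pos ((prefix2_iff _ _).mpr ⟨rfl, R, rfl⟩)]
    simp only [List.length_cons, List.length_nil, List.drop_succ_cons, List.drop_zero]
    rw [spl2_of_noCC R hR]
  | cons c L' ih =>
    rw [List.cons_append, splF_cons, if_neg (step_not_prefix c L' R hL hlast)]
    by_cases hnil : L' = []
    · subst hnil
      simp at hlast
      rw [List.nil_append, splF_cons, if_pos ((prefix2_iff _ _).mpr ⟨rfl, R, rfl⟩)]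
      simp only [List.length_cons, List.length_nil, List.drop_succ_cons, List.drop_zero]
      rw [spl2_of_noCC R hR]
    · rw [ih (noCC_tail c L' hL) (getLast?_tail c L' hnil hlast)]

theorem decomp_exists (s : List Char) (h2 : cntF [':', ':'] s = 1) (h3 : cntF [':', ':', ':'] s = 0) :
    ∃ L R, s = L ++ ':' :: ':' :: R ∧ noCC L ∧ L.getLast? ≠ some ':' ∧ noCC R ∧ R.head? ≠ some ':' := by
  induction s with
  | nil => simp [cntF_nil] at h2
  | cons c t ih =>
    by_cases hp : [':', ':'].isPrefixOf (c :: t)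
    · obtain ⟨hc, u, rfl⟩ := (prefix2_iff c t).mp hp
      subst hc
      rw [cntF_cons, if_pos hp] at h2
      simp only [List.length_cons, List.length_nil, List.drop_succ_cons, List.drop_zero] at h2
      have hu : noCC u := (cnt2_zero_iff u).mp (by omega)
      have hhu : u.head? ≠ some ':' := by
        intro hh
        cases u with
        | nil => simp at hh
        | cons d v =>
          simp at hh
          subst hh
          rw [cntF_cons, if_pos ((prefix3_iff _ _).mpr ⟨rfl, v, rfl⟩)] at h3
          omega
      exact ⟨[], u, by simp, noCC_nil, by simp, hu, hhu⟩
    · rw [cntF_cons, if_neg hp] at h2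
      rw [cntF_cons, if_neg (by intro hq; exact hp (by
            obtain ⟨hc, u, hu⟩ := (prefix3_iff c t).mp hq
            exact (prefix2_iff c t).mpr ⟨hc, ':' :: u, hu⟩))] at h3
      obtain ⟨L, R, rfl, hL, hlast, hR, hhead⟩ := ih h2 h3
      refine ⟨c :: L, R, rfl, ?_, ?_, hR, hhead⟩
      · rw [noCC_cons_iff]
        refine ⟨?_, hL⟩
        intro b hb hcb
        cases L with
        | nil =>
          exact hp ((prefix2_iff c _).mpr ⟨hcb.1, ':' :: R, by simp⟩)
        | cons b' L' =>
          simp at hb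
          exact hp ((prefix2_iff c _).mpr ⟨hcb.1, L' ++ ':' :: ':' :: R, by rw [hb, hcb.2]; rfl⟩)
      · cases L with
        | nil => simpa using fun hc0 => hp ((prefix2_iff c _).mpr ⟨hc0, ':' :: R, by simp⟩)
        | cons b' L' => simpa using hlast


theorem rep0_zero : rep0 0 = [] := by simp [rep0]

theorem rep0_succ (i : Nat) : rep0 (i + 1) = chunk ++ rep0 i := by
  simp [rep0, List.replicate_succ]

theorem count_colon_chunk : chunk.count ':' = 1 := by decide

theorem noCC_chunk_ext (L : List Char) (hL : noCC L) (hlast : L.getLast? ≠ some ':') :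
    noCC (L ++ chunk) ∧ (L ++ chunk).getLast? ≠ some ':' := by
  constructor
  · unfold noCC
    rw [List.isChain_append]
    refine ⟨hL, by decide, ?_⟩
    intro x hx y hy hxy
    exact hlast (by rw [← hxy.1]; exact hx)
  · rw [List.getLast?_append_of_ne_nil L (by simp [chunk, zeros4])]
    decide

theorem noCC_rep0_ext (M : Nat) : ∀ (L : List Char), noCC L → L.getLast? ≠ some ':' →
    noCC (L ++ rep0 M) ∧ (L ++ rep0 M).getLast? ≠ some ':' := by
  induction M with
  | zero => intro L hL hlast; simpa [rep0_zero] using ⟨hL, hlast⟩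
  | succ n ih =>
    intro L hL hlast
    have h1 := noCC_chunk_ext L hL hlast
    have := ih (L ++ chunk) h1.1 h1.2
    simpa [rep0_succ, List.append_assoc] using this

theorem loopA_decomp (k : Nat) : ∀ (L R : List Char), noCC L → L.getLast? ≠ some ':' →
    noCC R → R.head? ≠ some ':' → 8 ≤ (L ++ ':' :: ':' :: R).count ':' + k →
    loopA (L ++ ':' :: ':' :: R) =
      L ++ rep0 (8 - (L ++ ':' :: ':' :: R).count ':') ++ ':' :: ':' :: R := by
  induction k with
  | zero =>
    intro L R hL hlast hR hhead hk
    rw [loopA, dif_neg]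
    · rw [show 8 - (L ++ ':' :: ':' :: R).count ':' = 0 by omega, rep0_zero]
      simp
    · rw [chars_count_eq _ _ (by simp), cntF_colon_eq_count]
      intro hcon
      omega
  | succ n ih =>
    intro L R hL hlast hR hhead hk
    by_cases hbig : 8 ≤ (L ++ ':' :: ':' :: R).count ':'
    · rw [loopA, dif_neg]
      · rw [show 8 - (L ++ ':' :: ':' :: R).count ':' = 0 by omega, rep0_zero]
        simp
      · rw [chars_count_eq _ _ (by simp), cntF_colon_eq_count]
        intro hcon
        omega
    · rw [loopA, dif_pos]
      · rw [chars_replace_eq _ _ _ (by simp),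
            repF2_decomp ([':', '0', '0', '0', '0', ':', ':']) L R hL hlast hR hhead]
        have hsplit : L ++ [':', '0', '0', '0', '0', ':', ':'] ++ R
            = (L ++ chunk) ++ ':' :: ':' :: R := by
          simp [chunk, zeros4]
        rw [hsplit]
        have hext := noCC_chunk_ext L hL hlast
        have hcnt : ((L ++ chunk) ++ ':' :: ':' :: R).count ':'
            = (L ++ ':' :: ':' :: R).count ':' + 1 := by
          simp [List.count_append, count_colon_chunk, List.count_cons]
          omega
        rw [ih (L ++ chunk) R hext.1 hext.2 hR hhead (by omega)]
        rw [hcnt]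
        have harith : 8 - (L ++ ':' :: ':' :: R).count ':'
            = (8 - ((L ++ ':' :: ':' :: R).count ':' + 1)) + 1 := by omega
        rw [harith, rep0_succ]
        simp [List.append_assoc]
      · constructor
        · rw [chars_count_eq _ _ (by simp), cntF_colon_eq_count]
          omega
        · rw [chars_count_eq _ _ (by simp)]
          exact cnt2_decomp L R hL hlast hR hhead

-- splitting on a single ':'
theorem spl1_cons (c : Char) (t : List Char) :
    splF [':'] (c :: t) = if c = ':' then [] :: splF [':'] t
      else match splF [':'] t with
        | [] => [[c]]
        | h :: r => (c :: h) :: r := by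
  rw [splF_cons]
  by_cases hc : c = ':'
  · rw [if_pos ((prefix1_iff c t).mpr hc), if_pos hc]
    simp
  · rw [if_neg (fun hp => hc ((prefix1_iff c t).mp hp)), if_neg hc]

theorem spl1_append (x y : List Char) :
    splF [':'] (x ++ ':' :: y) = splF [':'] x ++ splF [':'] y := by
  induction x with
  | nil =>
    rw [List.nil_append, spl1_cons, if_pos rfl, splF_nil]
    simp
  | cons c x' ih =>
    rw [List.cons_append, spl1_cons, spl1_cons]
    by_cases hc : c = ':'
    · rw [if_pos hc, if_pos hc, ih]
      simp
    · rw [if_neg hc, if_neg hc, ih]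
      have := splF_ne_nil [':'] x'
      cases hsp : splF [':'] x' with
      | nil => exact absurd hsp this
      | cons h r => simp

theorem spl1_no_colon (x : List Char) (h : ':' ∉ x) : splF [':'] x = [x] := by
  induction x with
  | nil => exact splF_nil [':']
  | cons c t ih =>
    simp at h
    rw [spl1_cons, if_neg (fun hc => h.1 hc.symm), ih h.2]

theorem spl1_rep0 (M : Nat) : ∀ (L R : List Char),
    splF [':'] (L ++ rep0 M ++ ':' :: R) =
      splF [':'] L ++ List.replicate M zeros4 ++ splF [':'] R := by
  induction M with
  | zero =>
    intro L R
    simp only [rep0_zero, List.append_nil, List.replicate_zero, spl1_append]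
  | succ n ih =>
    intro L R
    have hshape : L ++ rep0 (n + 1) ++ ':' :: R = L ++ ':' :: (zeros4 ++ rep0 n ++ ':' :: R) := by
      simp [rep0_succ, chunk]
    rw [hshape, spl1_append, ih zeros4 R,
        spl1_no_colon zeros4 (by decide), List.replicate_succ]
    simp

-- zfill-related facts
theorem zf_nil_eq_zf_zeros4 : PySem.Chars.zfill [] 4 = PySem.Chars.zfill zeros4 4 := by decide

-- the '0000'-prepend of A changes the split only in a way zfill cancels
theorem filled_split (v : List Char) :
    (splF [':'] (if PySem.Chars.startswith v [':'] then '0' :: '0' :: '0' :: '0' :: v else v)).map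
        (fun s => PySem.Chars.zfill s 4)
      = (splF [':'] v).map (fun s => PySem.Chars.zfill s 4) := by
  by_cases hst : PySem.Chars.startswith v [':'] = true
  · rw [if_pos hst]
    cases v with
    | nil => simp [PySem.Chars.startswith, List.isPrefixOf] at hst
    | cons c u =>
      have hc : c = ':' := (prefix1_iff c u).mp (by simpa [PySem.Chars.startswith] using hst)
      subst hc
      have hshape : ('0' :: '0' :: '0' :: '0' :: ':' :: u) = zeros4 ++ ':' :: u := by
        simp [zeros4]
      rw [hshape, spl1_append, spl1_no_colon zeros4 (by decide),
          spl1_cons, if_pos rfl]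
      simp [zf_nil_eq_zf_zeros4]
  · rw [if_neg hst]

theorem filled_len (v : List Char) (h : ∀ x ∈ splF [':'] v, x.length ≤ 4) :
    ∀ x ∈ splF [':'] (if PySem.Chars.startswith v [':'] then '0' :: '0' :: '0' :: '0' :: v else v),
      x.length ≤ 4 := by
  by_cases hst : PySem.Chars.startswith v [':'] = true
  · rw [if_pos hst]
    cases v with
    | nil => simp [PySem.Chars.startswith, List.isPrefixOf] at hst
    | cons c u =>
      have hc : c = ':' := (prefix1_iff c u).mp (by simpa [PySem.Chars.startswith] using hst)
      subst hc
      have hshape : ('0' :: '0' :: '0' :: '0' :: ':' :: u) = zeros4 ++ ':' :: u := by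
        simp [zeros4]
      rw [hshape, spl1_append, spl1_no_colon zeros4 (by decide)]
      intro x hx
      rcases List.mem_append.mp hx with hx | hx
      · simp at hx; subst hx; decide
      · exact h x (by rw [spl1_cons, if_pos rfl]; simp [hx])
  · rw [if_neg hst]
    exact h

theorem zeros4_def : ['0', '0', '0', '0'] = zeros4 := rfl

theorem any_long_eq_false (l : List (List Char)) (h : ∀ x ∈ l, x.length ≤ 4) :
    (l.any fun s => 4 < s.length) = false := by
  rw [List.any_eq_false]
  intro x hx
  simpa using h x hx

theorem chars_splitOn_colon (l : List Char) : PySem.Chars.splitOn l [':'] = splF [':'] l :=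
  chars_splitOn_eq l [':'] (by simp)

-- shared endgame of both branches: the '0000'-prepend and the segment check agree
theorem final_glue (v : List Char) (segsB : List (List Char))
    (hv : ∀ x ∈ splF [':'] v, x.length ≤ 4) (heq : splF [':'] v = segsB) :
    (if (splF [':'] (if PySem.Chars.startswith v [':'] then '0' :: '0' :: '0' :: '0' :: v else v)).any
          (fun s => 4 < s.length) = true then ""
     else String.ofList (PySem.Chars.join []
        ((splF [':'] (if PySem.Chars.startswith v [':'] then '0' :: '0' :: '0' :: '0' :: v else v)).map
          (fun s => PySem.Chars.zfill s 4))))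
    = (if segsB.any (fun s => 4 < s.length) = true then ""
       else String.ofList (PySem.Chars.join [] (segsB.map (fun s => PySem.Chars.zfill s 4)))) := by
  subst heq
  rw [any_long_eq_false _ (filled_len v hv), any_long_eq_false _ hv]
  simp only [Bool.false_eq_true, if_false]
  rw [filled_split]

-- ===== VERDICT (by name: the statement is the Claim_ definition above) =====
theorem decompress_ip6_spec : Claim_equal_decompress_ip6 := by
  unfold Claim_equal_decompress_ip6
  intro ip6 strict _ hpre
  unfold Spec_decompress_ip6
  simp only [decompress_ip6, decompress_ip6_alt]
  unfold Pre_decompress_ip6 at hpre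
  set low := PySem.Chars.lower ip6.toList with hlowdef
  clear_value low
  obtain ⟨-, hrest⟩ := hpre
  by_cases h1 : (if strict = true then low.all fun c => PySem.Chars.isIn [c] ADDRESS_CHARS_STRICT.toList
      else low.all fun c => PySem.Chars.isIn [c] ADDRESS_CHARS_NON_STRICT.toList) = false
  · rw [if_pos h1, if_pos h1]
  rw [if_neg h1, if_neg h1]
  by_cases h2 : low.length = 32 ∧ PySem.Chars.count low [':'] = 0
  · rw [if_pos h2, if_pos h2]
  rw [if_neg h2, if_neg h2]
  by_cases h3 : 1 < PySem.Chars.count low [':', ':'] ∨ 1 ≤ PySem.Chars.count low [':', ':', ':']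
  · rw [if_pos h3, if_pos h3]
  rw [if_neg h3, if_neg h3]
  by_cases h4 : PySem.Chars.count low [':'] < 7 ∧ PySem.Chars.count low [':', ':'] ≠ 1
  · rw [if_pos h4, if_pos h4]
  rw [if_neg h4, if_neg h4]
  -- the main branch; Pre_'s first disjunct is ruled out by ¬h2
  have hsegs : ∀ seg ∈ splF [':'] low, seg.length ≤ 4 := by
    rcases hrest with h32 | hmain
    · exact absurd h32 h2
    · intro seg hseg
      exact hmain.2.2.2 seg (by rwa [chars_splitOn_eq low [':'] (by simp)])
  push_neg at h3
  have hcc3 : cntF [':', ':', ':'] low = 0 := by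
    have := h3.2
    rw [chars_count_eq _ _ (by simp)] at this
    omega
  by_cases hc2 : PySem.Chars.count low [':', ':'] = 1
  · -- one '::' present: decompose low = L ++ "::" ++ R
    rw [if_pos hc2]
    have h2' : cntF [':', ':'] low = 1 := by rwa [← chars_count_eq _ _ (by simp)]
    obtain ⟨L, R, rfl, hL, hlast, hR, hhead⟩ := decomp_exists low h2' hcc3
    have hsplow : splF [':'] (L ++ ':' :: ':' :: R) = splF [':'] L ++ [] :: splF [':'] R := by
      have hx : L ++ ':' :: ':' :: R = L ++ ':' :: (':' :: R) := rfl
      rw [hx, spl1_append, spl1_cons, if_pos rfl]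
    -- A side: run the loop, replace '::' by ':'
    have hloop := loopA_decomp 8 L R hL hlast hR hhead (by omega)
    rw [hloop]
    have hrepx := noCC_rep0_ext (8 - (L ++ ':' :: ':' :: R).count ':') L hL hlast
    rw [chars_replace_eq _ _ _ (by simp),
        repF2_decomp [':'] (L ++ rep0 (8 - (L ++ ':' :: ':' :: R).count ':')) R hrepx.1 hrepx.2 hR hhead]
    have hshape : L ++ rep0 (8 - (L ++ ':' :: ':' :: R).count ':') ++ [':'] ++ R
        = L ++ rep0 (8 - (L ++ ':' :: ':' :: R).count ':') ++ ':' :: R := by simp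
    rw [hshape]
    -- B side: split on '::' gives [L, R]
    rw [chars_splitOn_eq _ [':', ':'] (by simp), spl2_decomp L R hL hlast hR hhead]
    dsimp only
    simp only [chars_splitOn_colon]
    have hM : (max (8 - (PySem.Chars.count (L ++ ':' :: ':' :: R) [':'] : Int)) 0).toNat
        = 8 - (L ++ ':' :: ':' :: R).count ':' := by
      rw [chars_count_eq _ _ (by simp), cntF_colon_eq_count]
      omega
    have hlen : ∀ x ∈ splF [':'] (L ++ rep0 (8 - (L ++ ':' :: ':' :: R).count ':') ++ ':' :: R),
        x.length ≤ 4 := by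
      rw [spl1_rep0]
      intro x hx
      rcases List.mem_append.mp hx with hx' | hx'
      · rcases List.mem_append.mp hx' with hx'' | hx''
        · exact hsegs x (by rw [hsplow]; exact List.mem_append.mpr (Or.inl hx''))
        · rw [List.eq_of_mem_replicate hx'']; decide
      · exact hsegs x (by
          rw [hsplow]
          exact List.mem_append.mpr (Or.inr (List.mem_cons.mpr (Or.inr hx'))))
    exact final_glue _ _ hlen (by rw [spl1_rep0, hM, zeros4_def])
  · -- no '::': the loop exits at once and the replace does nothing
    rw [if_neg hc2]
    have h20 : cntF [':', ':'] low = 0 := by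
      have := h3.1
      rw [chars_count_eq _ _ (by simp)] at this hc2
      omega
    have hnc : noCC low := (cnt2_zero_iff low).mp h20
    rw [loopA, dif_neg (by intro hcon; exact hc2 hcon.2)]
    rw [chars_replace_eq _ _ _ (by simp), repF2_of_noCC [':'] low hnc]
    simp only [chars_splitOn_colon]
    exact final_glue low _ hsegs rfl
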